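-- pv_equiv track=rewrite | github.com/alros/rag-python | 14-smarter-ingest/PDFDirectoryReader.py | _enrich_header
-- ===== SOURCE A (Python) =====
-- def _enrich_header(tokens_header: list[str], tokens_current: list[str]) -> list[str]:
--     for i, _ in enumerate(tokens_current):
--         if len(tokens_header) <= i:
--             tokens_header = tokens_current
--             break
--         elif tokens_header[i] == tokens_current[i] or len(tokens_header[i].split()[0].split(".")) == len(
--                 tokens_current[i].split()[0].split(".")):
--             break
--         tokens_header.insert(i, tokens_current[i])
--     return tokens_header
-- ===== SOURCE B (Python) =====
-- def _enrich_header(tokens_header: list[str], tokens_current: list[str]) -> list[str]: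
--     if not tokens_header:
--         return tokens_current
--     h0 = tokens_header[0]
--
--     def merge(rest: list[str]) -> list[str]:
--         if not rest:
--             return tokens_header
--         c = rest[0]
--         if c == h0 or len(h0.split()[0].split(".")) == len(c.split()[0].split(".")):
--             return tokens_header
--         return [c] + merge(rest[1:])
--
--     return merge(tokens_current)
-- ===== Notes on version B (the rewrite author's own statement) =====
-- stated objective: simpler
-- what changed: A's imperative loop that mutates tokens_header with index-shifting insert(i, .) calls is replaced by a structural recursion over tokens_current that builds the merged list front-to-back, returning tokens_header at the first token equal to the first header token or of equal dotted-number depth; no indices and no mutation.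
import Mathlib
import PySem

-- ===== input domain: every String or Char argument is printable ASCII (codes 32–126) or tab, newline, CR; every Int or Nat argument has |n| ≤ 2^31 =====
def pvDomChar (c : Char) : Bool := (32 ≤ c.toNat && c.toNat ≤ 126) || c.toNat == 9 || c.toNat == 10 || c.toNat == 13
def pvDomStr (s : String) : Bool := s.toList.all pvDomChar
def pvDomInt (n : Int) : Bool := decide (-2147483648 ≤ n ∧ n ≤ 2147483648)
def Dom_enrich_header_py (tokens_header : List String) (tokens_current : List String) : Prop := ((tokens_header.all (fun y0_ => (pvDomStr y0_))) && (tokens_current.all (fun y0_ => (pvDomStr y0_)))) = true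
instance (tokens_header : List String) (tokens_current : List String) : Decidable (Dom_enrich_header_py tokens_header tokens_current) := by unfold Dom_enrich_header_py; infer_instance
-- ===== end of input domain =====

-- B replaces A's imperative index-shifting insert-at-i loop by a structural recursion that builds the
-- merged list front-to-back, returning tokens_header at the first matching token (objective: simpler).
-- A mutates tokens_header in place, B builds a fresh list: the equivalence proved here is about the
-- return value only.

-- ===== PORT A =====
-- len(s.split()[0].split(".")); the [] case is Python's IndexError (excluded by Pre_), 0 is a fallback.
def pvWc (s : String) : Nat :=
  match PySem.Str.split₀ s with
  | [] => 0
  | w :: _ => ((PySem.Str.split? w ".").getD []).length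

-- the for-loop of A: rem drives `enumerate(tokens_current)`, i is the index; the Python indexes
-- tokens_header[i] / tokens_current[i], both in range in the reached branches (i < len(tcFull) and
-- i < len(th) there), so List.getD · · "" is exact indexing.
def pvALoop (tcFull : List String) (th : List String) (i : Nat) (rem : List String) : List String :=
  match rem with
  | [] => th
  | _ :: rest =>
    if th.length ≤ i then tcFull
    else
      let hi := th.getD i ""
      let ci := tcFull.getD i ""
      if hi == ci || pvWc hi == pvWc ci then th
      else pvALoop tcFull (PySem.List.insert th (i : Int) ci) (i + 1) rest

def enrich_header_py (tokens_header : List String) (tokens_current : List String) : List String :=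
  pvALoop tokens_current tokens_header 0 tokens_current

-- ===== PORT B =====
-- the inner recursive `merge` of B: closes over tokens_header and h0
def pvMerge (th : List String) (h0 : String) (rest : List String) : List String :=
  match rest with
  | [] => th
  | c :: rest' =>
    if c == h0 || pvWc h0 == pvWc c then th else c :: pvMerge th h0 rest'

def enrich_header_py_alt (tokens_header : List String) (tokens_current : List String) : List String :=
  match tokens_header with
  | [] => tokens_current
  | h0 :: _ => pvMerge tokens_header h0 tokens_current

-- ===== PRECONDITION & SPEC =====
-- Pre_ holds exactly where Python A returns: A raises IndexError only when h0 = tokens_header[0]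
-- or some scanned token of tokens_current before the first break is whitespace-only (wordless),
-- except when the very first comparison short-circuits by string equality.
def Pre_enrich_header_py (tokens_header : List String) (tokens_current : List String) : Prop :=
  tokens_current = [] ∨ tokens_header = [] ∨ tokens_current.headI = tokens_header.headI ∨
    (PySem.Str.split₀ tokens_header.headI ≠ [] ∧
      ∀ c ∈ tokens_current.takeWhile
          (fun c => !(c == tokens_header.headI || pvWc tokens_header.headI == pvWc c)),
        PySem.Str.split₀ c ≠ [])
instance (tokens_header : List String) (tokens_current : List String) : Decidable (Pre_enrich_header_py tokens_header tokens_current) := by unfold Pre_enrich_header_py; infer_instance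

def pvWitness_enrich_header_py : List String × List String := (["1.a x"], ["2.3 y", "z"])

def Spec_enrich_header_py (tokens_header : List String) (tokens_current : List String) (out : List String) : Prop := out = enrich_header_py_alt tokens_header tokens_current
instance (tokens_header : List String) (tokens_current : List String) (out : List String) : Decidable (Spec_enrich_header_py tokens_header tokens_current out) := by unfold Spec_enrich_header_py; infer_instance

-- ===== CLAIM (what is proved, stated in full; the proofs are below) =====
def Claim_equal_enrich_header_py : Prop := ∀ (tokens_header : List String) (tokens_current : List String), Dom_enrich_header_py tokens_header tokens_current → Pre_enrich_header_py tokens_header tokens_current → Spec_enrich_header_py tokens_header tokens_current (enrich_header_py tokens_header tokens_current)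

-- ===== LEMMAS AND PROOFS =====

lemma pv_insert_append_cons (acc H : List String) (c : String) :
    PySem.List.insert (acc ++ H) (acc.length : Int) c = acc ++ c :: H := by
  have h := PySem.List.insert_natCast (acc ++ H) acc.length c (by simp)
  simpa [List.take_left, List.drop_left] using h

lemma pv_getD_of_drop (tcFull : List String) (n : Nat) (c : String) (rest : List String)
    (h : tcFull.drop n = c :: rest) : tcFull.getD n "" = c := by
  have h1 : (tcFull.drop n)[0]? = some c := by rw [h]; rfl
  have h0 : tcFull[n]? = some c := by simpa [List.getElem?_drop] using h1
  simp [List.getD_eq_getElem?_getD, h0]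

lemma pv_aLoop_merge (tcFull : List String) (h0 : String) (H' : List String) :
    ∀ (rem acc : List String), rem = tcFull.drop acc.length →
      pvALoop tcFull (acc ++ h0 :: H') acc.length rem
        = acc ++ pvMerge (h0 :: H') h0 rem := by
  intro rem
  induction rem with
  | nil => intro acc _; simp [pvALoop, pvMerge]
  | cons c rest ih =>
    intro acc hdrop
    have hci : tcFull.getD acc.length "" = c := pv_getD_of_drop _ _ _ _ hdrop.symm
    have hhi : (acc ++ h0 :: H').getD acc.length "" = h0 := by
      simp [List.getD_eq_getElem?_getD]
    have hlen : ¬ (acc ++ h0 :: H').length ≤ acc.length := by simp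
    have htest : (h0 == c || pvWc h0 == pvWc c) = (c == h0 || pvWc h0 == pvWc c) := by
      rw [BEq.comm]
    simp only [pvALoop, hhi, hci, htest]
    rw [if_neg hlen]
    by_cases hc : (c == h0 || pvWc h0 == pvWc c) = true
    · rw [if_pos hc]
      simp [pvMerge, hc]
    · rw [if_neg hc]
      have hdrop' : rest = tcFull.drop (acc ++ [c]).length := by
        have := congrArg (List.drop 1) hdrop
        simpa [List.drop_drop, Nat.add_comm] using this
      have hih := ih (acc ++ [c]) hdrop'
      simp only [List.length_append, List.length_cons, List.length_nil] at hih
      rw [pv_insert_append_cons]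
      calc pvALoop tcFull (acc ++ c :: h0 :: H') (acc.length + 1) rest
      _ = pvALoop tcFull ((acc ++ [c]) ++ h0 :: H') (acc.length + 1) rest := by
          simp
      _ = (acc ++ [c]) ++ pvMerge (h0 :: H') h0 rest := by
          simpa using hih
      _ = acc ++ pvMerge (h0 :: H') h0 (c :: rest) := by
          simp [pvMerge, hc]

-- ===== VERDICT (by name: the statement is the Claim_ definition above) =====
theorem enrich_header_py_spec : Claim_equal_enrich_header_py := by
  intro th tc _ _
  unfold Spec_enrich_header_py
  cases tc with
  | nil =>
    cases th with
    | nil => simp [enrich_header_py, enrich_header_py_alt, pvALoop]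
    | cons h0 H' => simp [enrich_header_py, enrich_header_py_alt, pvALoop, pvMerge]
  | cons c rest =>
    cases th with
    | nil => simp [enrich_header_py, enrich_header_py_alt, pvALoop]
    | cons h0 H' =>
      have h := pv_aLoop_merge (c :: rest) h0 H' (c :: rest) [] (by simp)
      simpa [enrich_header_py, enrich_header_py_alt] using h
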